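-- pv_equiv track=rewrite | github.com/SaashaJoshi/Python | Methods and Functions/primeNotPrime.py | not_primes
-- ===== SOURCE A (Python) =====
-- from math import sqrt
--
-- def not_primes(a, b):
--     final=[]
--     for i in range(a,b):
--         for j in range(2, int(sqrt(i)) + 1):
--             if i %j  == 0:
--                 for x in str(i):
--                     if x not in '2357':
--                         break
--                 else:
--                     final.append(i)
--                 break
--     return final
-- ===== SOURCE B (Python) =====
-- def _is_composite(n):
--     j = 2
--     while j * j <= n:
--         if n % j == 0:
--             return True
--         j += 1
--     return False
--
--
-- def not_primes(a, b):
--     # Generate the (rare) numbers whose digits are all in {2,3,5,7} digit-length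
--     # by digit-length, in increasing order, and keep the composite ones in [a, b).
--     d = 0
--     while 10 ** d < b:
--         d += 1
--     res = []
--     level = [0]
--     for _ in range(d):
--         nxt = []
--         for x in level:
--             for dig in (2, 3, 5, 7):
--                 y = 10 * x + dig
--                 if y < b:
--                     nxt.append(y)
--         level = nxt
--         for x in level:
--             if x >= a and _is_composite(x):
--                 res.append(x)
--     return res
-- ===== Notes on version B (the rewrite author's own statement) =====
-- stated objective: faster
-- what changed: Instead of scanning every i in [a,b) and trial-dividing each, B generates only the numbers whose digits all lie in {2,3,5,7} (digit-length by digit-length, in increasing order, pruned at b) and trial-divides just those few candidates.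
import Mathlib
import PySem

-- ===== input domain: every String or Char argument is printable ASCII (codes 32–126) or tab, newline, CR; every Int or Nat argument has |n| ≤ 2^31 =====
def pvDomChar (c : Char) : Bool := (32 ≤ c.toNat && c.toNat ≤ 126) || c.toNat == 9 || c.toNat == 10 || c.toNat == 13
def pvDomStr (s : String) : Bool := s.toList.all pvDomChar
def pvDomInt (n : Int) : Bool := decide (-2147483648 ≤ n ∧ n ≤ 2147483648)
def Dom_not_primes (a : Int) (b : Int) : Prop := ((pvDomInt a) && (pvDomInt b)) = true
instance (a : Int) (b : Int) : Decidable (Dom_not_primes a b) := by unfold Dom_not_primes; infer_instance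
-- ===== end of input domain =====

-- B replaces A's scan of every i in [a,b) (trial division on each) by generating only the
-- numbers whose digits all lie in {2,3,5,7}, digit-length by digit-length in increasing
-- order, and trial-dividing just those candidates (objective: faster).

-- ===== PORT A =====
-- 'for x in str(i): if x not in "2357": break / else: final.append(i)' — appends iff every
-- character of str(i) is one of '2','3','5','7' (str(i) ported via PySem.Int.toChars)
def npDigitsOk (i : Int) : Bool :=
  (PySem.Int.toChars i).all (fun c => ['2', '3', '5', '7'].contains c)

-- inner 'for j in range(2, int(sqrt(i)) + 1)': at the FIRST divisor j run the digit check,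
-- then break; if no divisor, fall through
def npInner (i : Int) (js : List Int) (final : List Int) : List Int :=
  match js with
  | [] => final
  | j :: rest =>
      if PySem.Int.mod i j = 0 then
        if npDigitsOk i then final ++ [i] else final
      else npInner i rest final

-- int(sqrt(i)) ported as Nat.sqrt i.toNat: exact for 0 ≤ i ≤ 2^31 (the float sqrt of such i
-- rounds too accurately to cross an integer boundary); i < 0 makes math.sqrt raise (outside Pre_)
def not_primes (a : Int) (b : Int) : List Int :=
  (PySem.List.pyRange a b 1).foldl
    (fun final i =>
      npInner i (PySem.List.pyRange 2 (((Nat.sqrt i.toNat : Nat) : Int) + 1) 1) final) []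

-- ===== PORT B =====
-- 'j = 2; while j*j <= n: if n % j == 0: return True; j += 1; return False'
-- (structural fuel: (n-1).toNat bounds the remaining iterations; when the fuel is 0 the
-- while-condition j*j <= n is false anyway, so the fuel only makes the loop total)
def altCompLoop (n : Int) : Nat → Int → Bool
  | 0, _ => false
  | f + 1, j =>
    if j * j ≤ n then
      if PySem.Int.mod n j = 0 then true else altCompLoop n f (j + 1)
    else false

def altIsComposite (n : Int) : Bool := altCompLoop n (n - 1).toNat 2

-- 'd = 0; while 10 ** d < b: d += 1'  (fuel b.toNat bounds the iterations, since 10^d ≥ d+1)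
def altDigitLenGo (b : Int) : Nat → Nat → Nat
  | 0, d => d
  | f + 1, d => if (10 : Int) ^ d < b then altDigitLenGo b f (d + 1) else d

def altDigitLen (b : Int) : Nat := altDigitLenGo b b.toNat 0

-- 'nxt = []; for x in level: for dig in (2,3,5,7): y = 10*x+dig; if y < b: nxt.append(y)'
def altExtend (b : Int) (level : List Int) : List Int :=
  level.foldl (fun nxt x =>
    [2, 3, 5, 7].foldl
      (fun nxt2 dig => if 10 * x + dig < b then nxt2 ++ [10 * x + dig] else nxt2) nxt) []

-- 'level = [0]; for _ in range(d): level = <extend>; for x in level: if x >= a and _is_composite(x): res.append(x)'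
def not_primes_alt (a : Int) (b : Int) : List Int :=
  ((List.range (altDigitLen b)).foldl
    (fun (st : List Int × List Int) _ =>
      let lvl := altExtend b st.1
      (lvl, lvl.foldl (fun res x => if a ≤ x && altIsComposite x then res ++ [x] else res) st.2))
    ([0], [])).2

-- ===== PRECONDITION & SPEC =====

-- ===== PRECONDITION & SPEC =====
-- Pre_ excludes exactly the inputs where range(a,b) reaches a negative i, on which A's
-- math.sqrt(i) raises ValueError (A returns no value there)
def Pre_not_primes (a : Int) (b : Int) : Prop := 0 ≤ a ∨ b ≤ a
instance (a : Int) (b : Int) : Decidable (Pre_not_primes a b) := by unfold Pre_not_primes; infer_instance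
def pvWitness_not_primes : Int × Int := (0, 60)


def Spec_not_primes (a : Int) (b : Int) (out : List Int) : Prop := out = not_primes_alt a b
instance (a : Int) (b : Int) (out : List Int) : Decidable (Spec_not_primes a b out) := by unfold Spec_not_primes; infer_instance

-- ===== CLAIM (what is proved, stated in full; the proofs are below) =====
def Claim_equal_not_primes : Prop := ∀ (a : Int) (b : Int), Dom_not_primes a b → Pre_not_primes a b → Spec_not_primes a b (not_primes a b)

-- ===== LEMMAS AND PROOFS =====

theorem npInner_eq (i : Int) (js : List Int) (final : List Int) :
    npInner i js final =
      if (∃ j ∈ js, PySem.Int.mod i j = 0) then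
        (if npDigitsOk i then final ++ [i] else final)
      else final := by
  induction js with
  | nil => simp [npInner]
  | cons j rest ih =>
    by_cases h : PySem.Int.mod i j = 0
    · simp [npInner, h]
    · simp only [npInner, h, ih]
      simp [h]

def aPred (i : Int) : Bool :=
  ((PySem.List.pyRange 2 (((Nat.sqrt i.toNat : Nat) : Int) + 1) 1).any
      (fun j => PySem.Int.mod i j == 0)) && npDigitsOk i

theorem not_primes_eq_filter (a b : Int) :
    not_primes a b = (PySem.List.pyRange a b 1).filter aPred := by
  unfold not_primes
  have hfun : (fun (final : List Int) (i : Int) =>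
      npInner i (PySem.List.pyRange 2 (((Nat.sqrt i.toNat : Nat) : Int) + 1) 1) final)
      = fun final i => if aPred i then final ++ [i] else final := by
    funext final i
    rw [npInner_eq]
    have haP : (aPred i = true) ↔
        ((∃ j ∈ PySem.List.pyRange 2 (((Nat.sqrt i.toNat : Nat) : Int) + 1) 1,
          PySem.Int.mod i j = 0) ∧ npDigitsOk i = true) := by
      simp [aPred, Bool.and_eq_true, List.any_eq_true]
    by_cases hd : ∃ j ∈ PySem.List.pyRange 2 (((Nat.sqrt i.toNat : Nat) : Int) + 1) 1,
        PySem.Int.mod i j = 0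
    · by_cases hk : npDigitsOk i = true
      · rw [if_pos hd, if_pos hk, if_pos (haP.2 ⟨hd, hk⟩)]
      · rw [if_pos hd, if_neg hk, if_neg (fun h => hk (haP.1 h).2)]
    · rw [if_neg hd, if_neg (fun h => hd (haP.1 h).1)]
  rw [hfun, PySem.List.foldl_append_if_eq_filter]
  simp

theorem altCompLoop_iff (n : Int) : ∀ (f : Nat) (j : Int), 1 ≤ j → (n + 1 - j).toNat ≤ f →
    (altCompLoop n f j = true ↔ ∃ m : Int, j ≤ m ∧ m * m ≤ n ∧ PySem.Int.mod n m = 0) := by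
  intro f
  induction f with
  | zero =>
    intro j hj hf
    simp only [altCompLoop, Bool.false_eq_true, false_iff]
    rintro ⟨m, hm1, hm2, _⟩
    have h0 : n + 1 - j ≤ 0 := by omega
    nlinarith
  | succ f ih =>
    intro j hj hf
    rw [altCompLoop]
    split_ifs with h1 h2
    · simp only [true_iff]
      exact ⟨j, le_refl j, h1, h2⟩
    · have hjn : j ≤ n := by nlinarith
      rw [ih (j + 1) (by omega) (by omega)]
      constructor
      · rintro ⟨m, hm1, hm2, hm3⟩
        exact ⟨m, by omega, hm2, hm3⟩
      · rintro ⟨m, hm1, hm2, hm3⟩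
        refine ⟨m, ?_, hm2, hm3⟩
        rcases eq_or_lt_of_le hm1 with h | h
        · exact absurd hm3 (by rw [← h]; exact h2)
        · omega
    · simp only [false_iff]
      rintro ⟨m, hm1, hm2, hm3⟩
      have : j * j ≤ m * m := by nlinarith
      omega

theorem hasDiv_iff_comp (i : Int) (hi : 0 ≤ i) :
    (∃ j ∈ PySem.List.pyRange 2 (((Nat.sqrt i.toNat : Nat) : Int) + 1) 1,
        PySem.Int.mod i j = 0) ↔ altIsComposite i = true := by
  rw [altIsComposite, altCompLoop_iff i (i - 1).toNat 2 (by norm_num) (by omega)]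
  constructor
  · rintro ⟨j, hjmem, hjmod⟩
    rw [PySem.List.mem_pyRange_one] at hjmem
    obtain ⟨hj2, hjlt⟩ := hjmem
    have hjle : j ≤ ((Nat.sqrt i.toNat : Nat) : Int) := by omega
    have hsq : j * j ≤ i := by
      have h1 : j.toNat ≤ Nat.sqrt i.toNat := by omega
      have h2 : j.toNat * j.toNat ≤ i.toNat := Nat.le_sqrt.1 h1
      have h3 : ((j.toNat * j.toNat : Nat) : Int) ≤ ((i.toNat : Nat) : Int) := by exact_mod_cast h2
      push_cast at h3
      rw [Int.toNat_of_nonneg hi, Int.toNat_of_nonneg (by omega)] at h3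
      exact h3
    exact ⟨j, hj2, hsq, hjmod⟩
  · rintro ⟨m, hm2, hmsq, hmmod⟩
    refine ⟨m, ?_, hmmod⟩
    rw [PySem.List.mem_pyRange_one]
    refine ⟨hm2, ?_⟩
    have h1 : m.toNat * m.toNat ≤ i.toNat := by
      have : ((m.toNat * m.toNat : Nat) : Int) ≤ i := by
        push_cast
        rw [Int.toNat_of_nonneg (by omega)]
        exact hmsq
      omega
    have h2 : m.toNat ≤ Nat.sqrt i.toNat := Nat.le_sqrt.2 h1
    omega

def GoodK : Nat → Int → Prop
  | 0, x => x = 0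
  | k + 1, x => ∃ p, GoodK k p ∧ (x = 10 * p + 2 ∨ x = 10 * p + 3 ∨ x = 10 * p + 5 ∨ x = 10 * p + 7)

theorem goodK_nonneg : ∀ (k : Nat) (x : Int), GoodK k x → 0 ≤ x := by
  intro k
  induction k with
  | zero => intro x h; simp [GoodK] at h; omega
  | succ k ih =>
    rintro x ⟨p, hp, hx⟩
    have := ih p hp
    omega

theorem goodK_bounds : ∀ (k : Nat) (x : Int), GoodK (k + 1) x → 2 * 10 ^ k ≤ x ∧ x < 10 ^ (k + 1) := by
  intro k
  induction k with
  | zero =>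
    rintro x ⟨p, hp, hx⟩
    simp [GoodK] at hp
    subst hp
    simp at hx ⊢
    omega
  | succ k ih =>
    rintro x ⟨p, hp, hx⟩
    have hb := ih p hp
    have h1 : (10 : Int) ^ (k + 1) = 10 * 10 ^ k := by ring
    have h2 : (10 : Int) ^ (k + 2) = 10 * 10 ^ (k + 1) := by ring
    constructor <;> omega

def digAll (n : Nat) : Bool :=
  (n % 10 == 2 || n % 10 == 3 || n % 10 == 5 || n % 10 == 7) &&
    (if _h : n / 10 = 0 then true else digAll (n / 10))
termination_by n
decreasing_by omega

theorem toDigitsCore_all : ∀ (f n : Nat) (ds : List Char), n < f →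
    (Nat.toDigitsCore 10 f n ds).all (fun c => ['2', '3', '5', '7'].contains c) =
      (digAll n && ds.all (fun c => ['2', '3', '5', '7'].contains c)) := by
  intro f
  induction f with
  | zero => intro n ds h; omega
  | succ f ih =>
    intro n ds h
    rw [Nat.toDigitsCore]
    have hch : (['2', '3', '5', '7'].contains (n % 10).digitChar) =
        (n % 10 == 2 || n % 10 == 3 || n % 10 == 5 || n % 10 == 7) := by
      have hlt : n % 10 < 10 := Nat.mod_lt n (by norm_num)
      interval_cases h : n % 10 <;> simp [Nat.digitChar]
    by_cases h0 : n / 10 = 0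
    · rw [if_pos h0, List.all_cons, hch]
      conv_rhs => rw [digAll, dif_pos h0]
      rw [Bool.and_true]
    · rw [if_neg h0]
      rw [ih (n / 10) ((n % 10).digitChar :: ds) (by omega)]
      rw [List.all_cons, hch]
      conv_rhs => rw [digAll, dif_neg h0]
      cases digAll (n / 10) <;>
        cases (n % 10 == 2 || n % 10 == 3 || n % 10 == 5 || n % 10 == 7) <;> simp

theorem npDigitsOk_eq (i : Int) (hi : 0 ≤ i) : npDigitsOk i = digAll i.toNat := by
  unfold npDigitsOk PySem.Int.toChars
  rw [if_neg (by omega)]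
  rw [Nat.toDigits]
  rw [toDigitsCore_all (i.toNat + 1) i.toNat [] (by omega)]
  simp

theorem digAll_iff (n : Nat) : digAll n = true ↔ ∃ k, GoodK (k + 1) (n : Int) := by
  induction n using Nat.strong_induction_on with
  | _ n ih =>
    rw [digAll]
    by_cases h0 : n / 10 = 0
    · rw [dif_pos h0]
      have hn : n < 10 := by omega
      simp only [Bool.and_true, Bool.or_eq_true, beq_iff_eq]
      constructor
      · intro h
        refine ⟨0, 0, by simp [GoodK], ?_⟩
        omega
      · rintro ⟨k, hk⟩
        rcases k with _ | k
        · obtain ⟨p, hp, hx⟩ := hk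
          simp [GoodK] at hp
          subst hp
          omega
        · have := goodK_bounds (k + 1) n hk
          have h10 : (2 : Int) * 10 ^ (k + 1) ≥ 20 := by
            have : (10 : Int) ^ (k + 1) ≥ 10 ^ 1 := by
              apply pow_le_pow_right₀ <;> omega
            simpa using by omega
          omega
    · rw [dif_neg h0]
      rw [Bool.and_eq_true]
      rw [ih (n / 10) (by omega)]
      simp only [Bool.or_eq_true, beq_iff_eq]
      constructor
      · rintro ⟨hd, k, hk⟩
        refine ⟨k + 1, (n / 10 : Nat), hk, ?_⟩
        have : ((n / 10 : Nat) : Int) * 10 + ((n % 10 : Nat) : Int) = n := by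
          push_cast
          omega
        omega
      · rintro ⟨k, hk⟩
        rcases k with _ | k
        · have := goodK_bounds 0 n hk
          simp at this
          omega
        · obtain ⟨p, hp, hx⟩ := hk
          have hpnn := goodK_nonneg _ _ hp
          have hpn : p = ((n / 10 : Nat) : Int) ∧ ((n % 10 : Nat) : Int) = n - 10 * p := by
            constructor <;> [skip; omega]
            have : ((n / 10 : Nat) : Int) * 10 + ((n % 10 : Nat) : Int) = n := by push_cast; omega
            omega
          obtain ⟨hp1, hp2⟩ := hpn
          constructor
          · omega
          · exact ⟨k, hp1 ▸ hp⟩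

def lvlL (b : Int) : Nat → List Int
  | 0 => [0]
  | k + 1 => altExtend b (lvlL b k)

theorem altExtend_eq (b : Int) (level : List Int) :
    altExtend b level =
      level.flatMap (fun x =>
        ([2, 3, 5, 7].filter (fun dig => decide (10 * x + dig < b))).map (fun dig => 10 * x + dig)) := by
  unfold altExtend
  have hfun : (fun (nxt : List Int) (x : Int) =>
      [2, 3, 5, 7].foldl
        (fun nxt2 dig => if 10 * x + dig < b then nxt2 ++ [10 * x + dig] else nxt2) nxt)
      = fun nxt x => nxt ++
        ([2, 3, 5, 7].filter (fun dig => decide (10 * x + dig < b))).map (fun dig => 10 * x + dig) := by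
    funext nxt x
    rw [PySem.List.foldl_append_ite (fun dig => 10 * x + dig < b) (fun dig => 10 * x + dig)]
  rw [hfun, PySem.List.foldl_append_eq_flatMap]
  simp

theorem mem_lvlL (b : Int) : ∀ (k : Nat) (x : Int),
    x ∈ lvlL b (k + 1) ↔ GoodK (k + 1) x ∧ x < b := by
  intro k
  induction k with
  | zero =>
    intro x
    rw [lvlL, altExtend_eq]
    simp only [lvlL, List.flatMap_cons, List.flatMap_nil, List.append_nil, List.mem_map,
      List.mem_filter, List.mem_cons]
    constructor
    · rintro ⟨d, ⟨hd, hlt⟩, rfl⟩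
      refine ⟨⟨0, by simp [GoodK], ?_⟩, by simpa using hlt⟩
      simp at hd ⊢
      omega
    · rintro ⟨⟨p, hp, hx⟩, hlt⟩
      simp [GoodK] at hp
      subst hp
      rcases hx with h | h | h | h
      · exact ⟨2, ⟨by simp, by simpa using (by omega : (10:Int) * 0 + 2 < b)⟩, by omega⟩
      · exact ⟨3, ⟨by simp, by simpa using (by omega : (10:Int) * 0 + 3 < b)⟩, by omega⟩
      · exact ⟨5, ⟨by simp, by simpa using (by omega : (10:Int) * 0 + 5 < b)⟩, by omega⟩
      · exact ⟨7, ⟨by simp, by simpa using (by omega : (10:Int) * 0 + 7 < b)⟩, by omega⟩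
  | succ k ih =>
    intro x
    rw [lvlL, altExtend_eq]
    simp only [List.mem_flatMap, List.mem_map, List.mem_filter]
    constructor
    · rintro ⟨p, hpmem, d, ⟨hd, hlt⟩, rfl⟩
      obtain ⟨hgp, _⟩ := (ih p).1 hpmem
      refine ⟨⟨p, hgp, ?_⟩, by simpa using hlt⟩
      simp at hd
      rcases hd with h | h | h | h <;> omega
    · rintro ⟨⟨p, hgp, hx⟩, hlt⟩
      have hpnn := goodK_nonneg _ _ hgp
      have hpb : p < b := by omega
      refine ⟨p, (ih p).2 ⟨hgp, hpb⟩, ?_⟩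
      rcases hx with h | h | h | h
      · exact ⟨2, ⟨by simp, by simpa using (by omega : 10 * p + 2 < b)⟩, by omega⟩
      · exact ⟨3, ⟨by simp, by simpa using (by omega : 10 * p + 3 < b)⟩, by omega⟩
      · exact ⟨5, ⟨by simp, by simpa using (by omega : 10 * p + 5 < b)⟩, by omega⟩
      · exact ⟨7, ⟨by simp, by simpa using (by omega : 10 * p + 7 < b)⟩, by omega⟩

theorem lvlL_pairwise (b : Int) : ∀ (k : Nat), (lvlL b k).Pairwise (· < ·) := by
  intro k
  induction k with
  | zero => simp [lvlL]
  | succ k ih =>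
    rw [lvlL, altExtend_eq, List.pairwise_flatMap]
    constructor
    · intro p _
      rw [List.pairwise_map]
      have h4 : ([2, 3, 5, 7] : List Int).Pairwise (· < ·) := by decide
      exact (h4.filter _).imp (fun h => by omega)
    · refine ih.imp ?_
      intro p p' hpp x hx y hy
      simp only [List.mem_map, List.mem_filter, List.mem_cons] at hx hy
      obtain ⟨d, ⟨hd, _⟩, rfl⟩ := hx
      obtain ⟨d', ⟨hd', _⟩, rfl⟩ := hy
      simp at hd hd'
      rcases hd with h | h | h | h <;> rcases hd' with h' | h' | h' | h' <;> omega

def resF (a b : Int) : Nat → List Int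
  | 0 => []
  | k + 1 => resF a b k ++ (lvlL b (k + 1)).filter (fun x => a ≤ x && altIsComposite x)

theorem alt_eq_resF (a b : Int) : not_primes_alt a b = resF a b (altDigitLen b) := by
  unfold not_primes_alt
  have H : ∀ (D : Nat),
      (List.range D).foldl
        (fun (st : List Int × List Int) _ =>
          let lvl := altExtend b st.1
          (lvl, lvl.foldl (fun res x => if a ≤ x && altIsComposite x then res ++ [x] else res) st.2))
        ([0], []) = (lvlL b D, resF a b D) := by
    intro D
    induction D with
    | zero => simp [lvlL, resF]
    | succ D ihD =>
      rw [List.range_succ, List.foldl_append, ihD]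
      simp only [List.foldl_cons, List.foldl_nil]
      rw [PySem.List.foldl_append_if_eq_filter]
      rw [resF, lvlL]
  rw [H]

theorem mem_resF (a b : Int) : ∀ (D : Nat) (z : Int),
    z ∈ resF a b D ↔ ∃ k, k < D ∧ GoodK (k + 1) z ∧ z < b ∧ (a ≤ z && altIsComposite z) = true := by
  intro D
  induction D with
  | zero => simp [resF]
  | succ D ihD =>
    intro z
    rw [resF, List.mem_append, List.mem_filter, ihD, mem_lvlL]
    constructor
    · rintro (⟨k, hk, h1, h2, h3⟩ | ⟨⟨h1, h2⟩, h3⟩)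
      · exact ⟨k, by omega, h1, h2, h3⟩
      · exact ⟨D, by omega, h1, h2, h3⟩
    · rintro ⟨k, hk, h1, h2, h3⟩
      by_cases hkD : k < D
      · exact Or.inl ⟨k, hkD, h1, h2, h3⟩
      · have : k = D := by omega
        subst this
        exact Or.inr ⟨⟨h1, h2⟩, h3⟩

theorem resF_pairwise (a b : Int) : ∀ (D : Nat),
    (resF a b D).Pairwise (· < ·) ∧ ∀ z ∈ resF a b D, z < 10 ^ D := by
  intro D
  induction D with
  | zero => simp [resF]
  | succ D ihD =>
    obtain ⟨hp, hb⟩ := ihD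
    have hnew : ∀ z ∈ (lvlL b (D + 1)).filter (fun x => a ≤ x && altIsComposite x),
        2 * 10 ^ D ≤ z ∧ z < 10 ^ (D + 1) := by
      intro z hz
      rw [List.mem_filter, mem_lvlL] at hz
      exact goodK_bounds D z hz.1.1
    constructor
    · rw [resF, List.pairwise_append]
      refine ⟨hp, (lvlL_pairwise b (D + 1)).filter _, ?_⟩
      intro x hx y hy
      have h1 := hb x hx
      have h2 := (hnew y hy).1
      have h3 : (1 : Int) ≤ 10 ^ D := one_le_pow₀ (by norm_num)
      omega
    · intro z hz
      rw [resF, List.mem_append] at hz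
      have h10 : (10 : Int) ^ (D + 1) = 10 * 10 ^ D := by ring
      have h1 : (1 : Int) ≤ 10 ^ D := one_le_pow₀ (by norm_num)
      rcases hz with hz | hz
      · have := hb z hz
        omega
      · exact (hnew z hz).2

theorem pow10_ge (k : Nat) : (k : Int) + 1 ≤ 10 ^ k := by
  induction k with
  | zero => norm_num
  | succ k ih =>
    have : (10 : Int) ^ (k + 1) = 10 * 10 ^ k := by ring
    push_cast
    omega

theorem digitLenGo_bound (b : Int) : ∀ (f : Nat) (d : Nat),
    b ≤ 10 ^ (d + f) → b ≤ 10 ^ altDigitLenGo b f d := by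
  intro f
  induction f with
  | zero => intro d h; simpa using h
  | succ f ih =>
    intro d h
    rw [altDigitLenGo]
    split_ifs with h1
    · refine ih (d + 1) ?_
      have he : d + 1 + f = d + (f + 1) := by omega
      rw [he]
      exact h
    · omega

theorem digitLen_bound (b : Int) : b ≤ 10 ^ altDigitLen b := by
  apply digitLenGo_bound
  by_cases hb : b ≤ 0
  · have : (1 : Int) ≤ 10 ^ (0 + b.toNat) := one_le_pow₀ (by norm_num)
    omega
  · have h1 := pow10_ge b.toNat
    simp only [Nat.zero_add]
    omega

theorem np_eq_of_pairwise_lt_of_mem_iff : ∀ (xs ys : List Int),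
    xs.Pairwise (· < ·) → ys.Pairwise (· < ·) → (∀ z, z ∈ xs ↔ z ∈ ys) → xs = ys := by
  intro xs
  induction xs with
  | nil =>
    intro ys _ _ h
    cases ys with
    | nil => rfl
    | cons y ys' => exact absurd ((h y).2 (List.mem_cons_self)) (by simp)
  | cons x xs' ih =>
    intro ys hx hy h
    cases ys with
    | nil => exact absurd ((h x).1 (List.mem_cons_self)) (by simp)
    | cons y ys' =>
      have hxy : x = y := by
        have h1 : x ∈ y :: ys' := (h x).1 List.mem_cons_self
        have h2 : y ∈ x :: xs' := (h y).2 List.mem_cons_self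
        rcases List.mem_cons.1 h1 with h1 | h1
        · exact h1
        rcases List.mem_cons.1 h2 with h2 | h2
        · exact h2.symm
        have := (List.pairwise_cons.1 hx).1 y h2
        have := (List.pairwise_cons.1 hy).1 x h1
        omega
      subst hxy
      have htail : ∀ z, z ∈ xs' ↔ z ∈ ys' := by
        intro z
        constructor
        · intro hz
          have hlt := (List.pairwise_cons.1 hx).1 z hz
          rcases List.mem_cons.1 ((h z).1 (List.mem_cons_of_mem _ hz)) with h' | h'
          · omega
          · exact h'
        · intro hz
          have hlt := (List.pairwise_cons.1 hy).1 z hz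
          rcases List.mem_cons.1 ((h z).2 (List.mem_cons_of_mem _ hz)) with h' | h'
          · omega
          · exact h'
      rw [ih ys' (List.pairwise_cons.1 hx).2 (List.pairwise_cons.1 hy).2 htail]

theorem main_eq (a b : Int) (hpre : Pre_not_primes a b) :
    not_primes a b = not_primes_alt a b := by
  rw [not_primes_eq_filter, alt_eq_resF]
  apply np_eq_of_pairwise_lt_of_mem_iff
  · exact (PySem.List.pairwise_lt_pyRange_one a b).filter _
  · exact (resF_pairwise a b _).1
  · intro z
    rw [List.mem_filter, PySem.List.mem_pyRange_one, mem_resF]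
    constructor
    · rintro ⟨⟨haz, hzb⟩, hp⟩
      rw [aPred, Bool.and_eq_true] at hp
      obtain ⟨hdiv, hdig⟩ := hp
      have hz0 : 0 ≤ z := by rcases hpre with h | h <;> omega
      rw [npDigitsOk_eq z hz0, digAll_iff] at hdig
      obtain ⟨k, hk⟩ := hdig
      rw [Int.toNat_of_nonneg hz0] at hk
      have hcomp : altIsComposite z = true := by
        refine (hasDiv_iff_comp z hz0).1 ?_
        rw [List.any_eq_true] at hdiv
        obtain ⟨j, hj, hjm⟩ := hdiv
        exact ⟨j, hj, by simpa using hjm⟩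
      refine ⟨k, ?_, hk, hzb, by simp [haz, hcomp]⟩
      have hbound := goodK_bounds k z hk
      have hD := digitLen_bound b
      have h1 : (1 : Int) ≤ 10 ^ k := one_le_pow₀ (by norm_num)
      have hlt : (10 : Int) ^ k < 10 ^ (altDigitLen b) := by omega
      exact (pow_lt_pow_iff_right₀ (by norm_num : (1 : Int) < 10)).1 hlt
    · rintro ⟨k, hkD, hgood, hzb, hfilt⟩
      rw [Bool.and_eq_true] at hfilt
      obtain ⟨haz', hcomp⟩ := hfilt
      have haz : a ≤ z := by simpa using haz'
      have hz0 : 0 ≤ z := goodK_nonneg _ _ hgood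
      refine ⟨⟨haz, hzb⟩, ?_⟩
      rw [aPred, Bool.and_eq_true]
      constructor
      · rw [List.any_eq_true]
        obtain ⟨j, hjm, hjmod⟩ := (hasDiv_iff_comp z hz0).2 hcomp
        exact ⟨j, hjm, by simpa using hjmod⟩
      · rw [npDigitsOk_eq z hz0, digAll_iff]
        exact ⟨k, by rw [Int.toNat_of_nonneg hz0]; exact hgood⟩


-- ===== VERDICT (by name: the statement is the Claim_ definition above) =====
theorem not_primes_spec : Claim_equal_not_primes := by
  intro a b _ hpre
  unfold Spec_not_primes
  exact main_eq a b hpre
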